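-- pv_equiv track=rewrite | github.com/metrorik/dz2_Martseniuk_IA | transposition.py | create_key_order
-- ===== SOURCE A (Python) =====
-- def create_key_order(key):
--     """
--     порядковий номер для кожної букви ключа на основі алфавітного порядку.
--     Якщо буква повторюється, їй присвоюється порядковий номер згідно з її порядком появи в ключі.
--     """
--     key = key.upper()
--     key_letters = list(key)
--
--     # Створюємо список кортежів (буква, оригінальний індекс)
--     sorted_letters = sorted([(letter, index) for index, letter in enumerate(key_letters)], key=lambda x: (x[0], x[1]))
--
--     order = {}
--     for i, (letter, original_index) in enumerate(sorted_letters, 1):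
--         # Якщо буква вже є в словнику, додаємо до списку порядкових номерів
--         if letter in order:
--             order[letter].append(i)
--         else:
--             order[letter] = [i]
--
--     key_order = []
--     letter_count = {}
--     for letter in key_letters:
--         if letter in letter_count:
--             letter_count[letter] += 1
--         else:
--             letter_count[letter] = 1
--         # Присвоюємо порядковий номер згідно з порядком появи
--         key_order.append(order[letter][letter_count[letter]-1])
--     return key_order
-- ===== SOURCE B (Python) =====
-- def create_key_order(key):
--     u = key.upper()
--     return [1 + sum(1 for d in u if d < c) + u[:i].count(c)
--             for i, c in enumerate(u)]
-- ===== Notes on version B (the rewrite author's own statement) =====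
-- stated objective: simpler
-- what changed: B drops the sort and both dictionaries entirely: each position's rank is computed directly as 1 + (number of strictly smaller letters in the key) + (number of equal letters appearing earlier), a closed counting formula per position (quadratic, but two lines).
import Mathlib
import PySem

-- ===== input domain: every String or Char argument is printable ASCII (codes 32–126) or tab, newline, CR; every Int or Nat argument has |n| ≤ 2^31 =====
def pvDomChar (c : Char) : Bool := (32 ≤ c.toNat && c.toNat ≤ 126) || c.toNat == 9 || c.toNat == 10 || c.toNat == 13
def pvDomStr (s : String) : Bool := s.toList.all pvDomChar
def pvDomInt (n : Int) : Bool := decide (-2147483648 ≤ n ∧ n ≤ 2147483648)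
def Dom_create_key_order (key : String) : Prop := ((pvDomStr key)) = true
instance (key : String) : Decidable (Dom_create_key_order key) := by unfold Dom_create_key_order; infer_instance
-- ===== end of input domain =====

-- B drops the sort and both dictionaries: each position's rank is a direct counting formula,
-- 1 + (# strictly smaller letters in the key) + (# equal letters appearing earlier) (objective: simpler).

-- ===== PORT A =====
def create_key_order (key : String) : List Int :=
  let key_letters := (PySem.Str.upper key).toList
  let sorted_letters := PySem.List.sorted2
    ((PySem.List.enumerate key_letters 0).map (fun q => (q.2, q.1)))
    (fun p => p.1) (fun p => p.2) false
  let order := (PySem.List.enumerate sorted_letters 1).foldl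
      (fun (d : PySem.Dict Char (List Int)) q =>
        if d.contains q.2.1 then d.modify q.2.1 [] (fun l => l ++ [q.1]) else d.insert q.2.1 [q.1])
      PySem.Dict.empty
  let res := key_letters.foldl
      (fun (st : List Int × PySem.Dict Char Int) letter =>
        let lc := if st.2.contains letter then st.2.modify letter 0 (fun n => n + 1)
                  else st.2.insert letter 1
        (st.1 ++ [PySem.List.pyGetD (order.getD letter []) (lc.getD letter 0 - 1) 0], lc))
      ([], PySem.Dict.empty)
  res.1

-- ===== PORT B =====
def create_key_order_alt (key : String) : List Int :=
  let u := (PySem.Str.upper key).toList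
  (PySem.List.enumerate u 0).map (fun q =>
    1 + u.foldl (fun acc d => if d < q.2 then acc + 1 else acc) (0 : Int)
      + (PySem.List.count (PySem.List.slice u none (some q.1)) q.2 : Int))

-- ===== PRECONDITION & SPEC =====
def Spec_create_key_order (key : String) (out : List Int) : Prop := out = create_key_order_alt key
instance (key : String) (out : List Int) : Decidable (Spec_create_key_order key out) := by unfold Spec_create_key_order; infer_instance

-- ===== CLAIM (what is proved, stated in full; the proofs are below) =====
def Claim_equal_create_key_order : Prop := ∀ (key : String), Dom_create_key_order key → Spec_create_key_order key (create_key_order key)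

-- ===== LEMMAS AND PROOFS =====

-- the swapped enumeration [(c, i) for i, c in enumerate(u)]
def psL (u : List Char) : List (Char × Int) :=
  (PySem.List.enumerate u 0).map (fun q => (q.2, q.1))

-- the sorted pair list A builds
def SL (u : List Char) : List (Char × Int) :=
  PySem.List.sorted2 (psL u) (fun p => p.1) (fun p => p.2) false

-- the lexicographic "before" test sorted2 uses
def ltP (a b : Char × Int) : Bool :=
  decide (a.1 < b.1) || (!decide (b.1 < a.1) && decide (a.2 < b.2))

lemma ltP_trans (a b c : Char × Int) (h1 : ltP a b = true) (h2 : ltP b c = true) :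
    ltP a c = true := by
  simp only [ltP, Bool.or_eq_true, Bool.and_eq_true, Bool.not_eq_true', decide_eq_true_eq,
    decide_eq_false_iff_not] at *
  rcases h1 with h1 | ⟨h1a, h1b⟩ <;> rcases h2 with h2 | ⟨h2a, h2b⟩
  · exact Or.inl (lt_trans h1 h2)
  · exact Or.inl (lt_of_lt_of_le h1 (le_of_not_gt h2a))
  · exact Or.inl (lt_of_le_of_lt (le_of_not_gt h1a) h2)
  · exact Or.inr ⟨fun hlt => h2a (lt_of_lt_of_le hlt (le_of_not_gt h1a)), lt_trans h1b h2b⟩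

lemma ltP_asymm (a b : Char × Int) (h : ltP a b = true) : ltP b a = false := by
  cases hb : ltP b a with
  | false => rfl
  | true =>
    have hirr : ltP a a = true := ltP_trans a b a h hb
    simp [ltP] at hirr

lemma ltP_total (a b : Char × Int) (h : a ≠ b) : ltP a b = true ∨ ltP b a = true := by
  simp only [ltP, Bool.or_eq_true, Bool.and_eq_true, Bool.not_eq_true', decide_eq_true_eq,
    decide_eq_false_iff_not]
  rcases lt_trichotomy a.1 b.1 with hc | hc | hc
  · exact Or.inl (Or.inl hc)
  · rcases lt_trichotomy a.2 b.2 with hi | hi | hi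
    · exact Or.inl (Or.inr ⟨fun h' => absurd h' (hc ▸ lt_irrefl _), hi⟩)
    · exact absurd (Prod.ext hc hi) h
    · exact Or.inr (Or.inr ⟨fun h' => absurd h' (hc ▸ lt_irrefl _), hi⟩)
  · exact Or.inr (Or.inl hc)

lemma pairwise_insertBy (x : Char × Int) (l : List (Char × Int))
    (h : l.Pairwise (fun a b => ltP b a = false)) :
    (PySem.List.insertBy ltP x l).Pairwise (fun a b => ltP b a = false) := by
  induction l with
  | nil => simp [PySem.List.insertBy]
  | cons y ys ih =>
    rcases h with _ | ⟨hy, hys⟩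
    by_cases hxy : ltP x y = true
    · rw [show PySem.List.insertBy ltP x (y :: ys) = x :: y :: ys by
        simp [PySem.List.insertBy, hxy]]
      refine List.Pairwise.cons ?_ (List.Pairwise.cons hy hys)
      intro z hz
      rcases List.mem_cons.mp hz with rfl | hz'
      · exact ltP_asymm _ _ hxy
      · cases hzx : ltP z x with
        | false => rfl
        | true =>
          have hzy : ltP z y = true := ltP_trans z x y hzx hxy
          rw [hy z hz'] at hzy; exact absurd hzy (by simp)
    · rw [show PySem.List.insertBy ltP x (y :: ys) = y :: PySem.List.insertBy ltP x ys by
        simp [PySem.List.insertBy, hxy]]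
      refine List.Pairwise.cons ?_ (ih hys)
      intro z hz
      rcases (PySem.List.mem_insertBy ltP x z ys).mp hz with rfl | hz
      · simpa using hxy
      · exact hy z hz

lemma pairwise_foldl_insertBy (l : List (Char × Int)) (acc : List (Char × Int))
    (h : acc.Pairwise (fun a b => ltP b a = false)) :
    (l.foldl (fun acc x => PySem.List.insertBy ltP x acc) acc).Pairwise
      (fun a b => ltP b a = false) := by
  induction l generalizing acc with
  | nil => exact h
  | cons x xs ih => exact ih _ (pairwise_insertBy x acc h)

lemma SL_pairwise (u : List Char) : (SL u).Pairwise (fun a b => ltP b a = false) := by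
  have : SL u = (psL u).foldl (fun acc x => PySem.List.insertBy ltP x acc) [] := rfl
  rw [this]
  exact pairwise_foldl_insertBy _ _ (by simp)

lemma SL_perm (u : List Char) : (SL u).Perm (psL u) := PySem.List.sorted2_perm _ _ _ _

lemma psL_snd_pairwise (u : List Char) : (psL u).Pairwise (fun a b => a.2 < b.2) := by
  exact (PySem.List.pairwise_lt_enumerate u 0).map _ (fun a b h => h)

lemma psL_nodup (u : List Char) : (psL u).Nodup := by
  exact (psL_snd_pairwise u).imp (fun h => by intro he; rw [he] at h; exact lt_irrefl _ h)

lemma SL_nodup (u : List Char) : (SL u).Nodup := ((SL_perm u).nodup_iff).mpr (psL_nodup u)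

-- the sorted list and the original pair list agree letter by letter
lemma filter_SL_eq (u : List Char) (c : Char) :
    (SL u).filter (fun p => p.1 == c) = (psL u).filter (fun p => p.1 == c) := by
  have hperm : ((SL u).filter (fun p => p.1 == c)).Perm ((psL u).filter (fun p => p.1 == c)) :=
    (SL_perm u).filter _
  have hS : ((SL u).filter (fun p => p.1 == c)).Pairwise (fun a b => a.2 < b.2) := by
    have h1 : ((SL u).filter (fun p => p.1 == c)).Pairwise
        (fun a b => ltP b a = false ∧ a ≠ b) :=
      List.Pairwise.sublist List.filter_sublist ((SL_pairwise u).and (SL_nodup u))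
    refine h1.imp_of_mem ?_
    intro a b ha hb ⟨hle, hne⟩
    have hac : a.1 = c := by simpa using (List.mem_filter.mp ha).2
    have hbc : b.1 = c := by simpa using (List.mem_filter.mp hb).2
    simp only [ltP, Bool.or_eq_false_iff, Bool.and_eq_false_iff, decide_eq_false_iff_not,
      Bool.not_eq_false', decide_eq_true_eq] at hle
    rcases hle with ⟨-, h2⟩
    rcases h2 with h2 | h2
    · rw [hac, hbc] at h2; exact absurd h2 (lt_irrefl c)
    · rcases lt_trichotomy a.2 b.2 with h | h | h
      · exact h
      · exact absurd (Prod.ext (hac.trans hbc.symm) h) hne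
      · exact absurd h h2
  have hps : ((psL u).filter (fun p => p.1 == c)).Pairwise (fun a b => a.2 < b.2) :=
    List.Pairwise.sublist List.filter_sublist (psL_snd_pairwise u)
  exact hperm.eq_of_pairwise (fun a b _ _ h1 h2 => absurd h2 (lt_asymm h1)) hS hps

-- A's rank list for letter c, read at the occurrence position of p, is p's 1-based rank in l
lemma key_rank (l : List (Char × Int)) (s : Int) (c : Char) (p : Char × Int)
    (hm : p ∈ l) (hc : p.1 = c) :
    (((PySem.List.enumerate l s).filter (fun q => q.2.1 == c)).map (fun q => q.1)).getD
      ((l.filter (fun q => q.1 == c)).idxOf p) 0 = s + l.idxOf p := by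
  induction l generalizing s with
  | nil => simp at hm
  | cons q t ih =>
    rw [PySem.List.enumerate_cons]
    by_cases hq : q.1 = c
    · rw [List.filter_cons_of_pos (by simpa using hq), List.filter_cons_of_pos (by simpa using hq),
        List.map_cons]
      by_cases hpq : p = q
      · subst hpq
        rw [List.idxOf_cons_self, List.idxOf_cons_self]
        simp
      · have hm' : p ∈ t := by rcases List.mem_cons.mp hm with h | h; exact absurd h hpq; exact h
        rw [List.idxOf_cons_ne _ (fun h => hpq h.symm), List.idxOf_cons_ne _ (fun h => hpq h.symm)]
        rw [Nat.succ_eq_add_one, List.getD_cons_succ]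
        rw [ih (s + 1) hm']
        push_cast; ring
    · have hpq : p ≠ q := fun h => hq (h ▸ hc)
      rw [List.filter_cons_of_neg (by simpa using hq), List.filter_cons_of_neg (by simpa using hq)]
      have hm' : p ∈ t := by rcases List.mem_cons.mp hm with h | h; exact absurd h hpq; exact h
      rw [List.idxOf_cons_ne _ (fun h => hpq h.symm)]
      rw [ih (s + 1) hm']
      push_cast; ring

-- occurrence index of (c, s+j) among the c-pairs of the swapped enumeration = count of c before j
lemma psL_occ (u : List Char) (s : Int) (j : Nat) (c : Char) (hj : u[j]? = some c) :
    (((PySem.List.enumerate u s).map (fun q => (q.2, q.1))).filter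
        (fun q => q.1 == c)).idxOf (c, s + j) = (u.take j).count c := by
  induction u generalizing s j with
  | nil => simp at hj
  | cons d t ih =>
    rw [PySem.List.enumerate_cons, List.map_cons]
    cases j with
    | zero =>
      have hd : d = c := by simpa using hj
      subst hd
      rw [List.filter_cons_of_pos (by simp)]
      simp
    | succ j' =>
      have hj' : t[j']? = some c := by simpa using hj
      have harg : s + ((j' + 1 : Nat) : Int) = (s + 1) + (j' : Int) := by push_cast; ring
      by_cases hd : d = c
      · rw [hd]
        rw [List.filter_cons_of_pos (by simp)]
        have hne : ((c, s + ((j' + 1 : Nat) : Int)) : Char × Int)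
            ≠ (((s, c).2, (s, c).1) : Char × Int) := by
          intro h
          have h2 := congrArg Prod.snd h
          simp at h2
          omega
        rw [List.idxOf_cons_ne _ (fun h => hne h.symm), harg, ih (s + 1) j' hj']
        simp
      · rw [List.filter_cons_of_neg (by simpa using hd)]
        rw [harg, ih (s + 1) j' hj']
        simp [hd]

lemma psL_mem (u : List Char) (j : Nat) (c : Char) (hj : u[j]? = some c) :
    (c, (j : Int)) ∈ psL u := by
  rcases List.getElem?_eq_some_iff.mp hj with ⟨hlt, hc⟩
  have hmem := List.mem_map_of_mem (f := fun q => (q.2, q.1))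
    ((PySem.List.mem_enumerate_iff u 0 _).mpr ⟨j, hlt, rfl⟩)
  simpa [psL, hc] using hmem

-- in a strictly sorted duplicate-free list, the index of p is the number of elements before p
lemma idxOf_eq_countP (S : List (Char × Int))
    (hs : S.Pairwise (fun a b => ltP b a = false)) (hnd : S.Nodup)
    (p : Char × Int) (hm : p ∈ S) :
    S.idxOf p = S.countP (fun x => ltP x p) := by
  induction S with
  | nil => simp at hm
  | cons y t ih =>
    rcases hs with _ | ⟨hy, hts⟩
    rcases hnd with _ | ⟨hyn, htn⟩
    by_cases hpy : p = y
    · subst hpy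
      rw [List.idxOf_cons_self]
      have h0 : ltP p p = false := by
        cases h : ltP p p with
        | false => rfl
        | true => exact absurd (ltP_asymm _ _ h) (by simp [h])
      rw [List.countP_cons_of_neg (by simpa using h0)]
      have : t.countP (fun x => ltP x p) = 0 := by
        rw [List.countP_eq_zero]
        intro z hz
        simpa using hy z hz
      omega
    · have hm' : p ∈ t := by rcases List.mem_cons.mp hm with h | h; exact absurd h hpy; exact h
      have hyp : ltP y p = true := by
        rcases ltP_total y p (fun h => hpy h.symm) with h | h
        · exact h
        · rw [hy p hm'] at h; exact absurd h (by simp)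
      rw [List.idxOf_cons_ne _ (fun h => hpy h.symm),
        List.countP_cons_of_pos (by simpa using hyp), ih hts htn hm']

-- elements of psL past the target index never satisfy the comparison (their index is too big)
lemma countP_enum_ge (t : List Char) (s m : Int) (c : Char) (hm : m ≤ s) :
    (((PySem.List.enumerate t s).map (fun q => (q.2, q.1))).countP (fun x => ltP x (c, m)))
    = t.countP (fun d => decide (d < c)) := by
  induction t generalizing s with
  | nil => simp
  | cons d r ih =>
    rw [PySem.List.enumerate_cons, List.map_cons]
    have hhead : ltP ((s, d).2, (s, d).1) (c, m) = decide (d < c) := by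
      simp only [ltP]
      have : decide (s < m) = false := by simpa using not_lt.mpr hm
      simp [this]
    by_cases hd : d < c
    · rw [List.countP_cons_of_pos (by rw [hhead]; simpa using hd),
        List.countP_cons_of_pos (by simpa using hd), ih (s + 1) (by omega)]
    · rw [List.countP_cons_of_neg (by rw [hhead]; simpa using hd),
        List.countP_cons_of_neg (by simpa using hd), ih (s + 1) (by omega)]

-- the number of pairs lexicographically before (c, s+i): smaller letters plus earlier equal letters
lemma countP_psL_main (u : List Char) (s : Int) (i : Nat) (c : Char) :
    (((PySem.List.enumerate u s).map (fun q => (q.2, q.1))).countP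
        (fun x => ltP x (c, s + i)))
    = u.countP (fun d => decide (d < c)) + (u.take i).count c := by
  induction u generalizing s i with
  | nil => simp
  | cons d t ih =>
    rw [PySem.List.enumerate_cons, List.map_cons]
    cases i with
    | zero =>
      have hterm : (((PySem.List.enumerate t (s + 1)).map (fun q => (q.2, q.1))).countP
          (fun x => ltP x (c, s + (0 : Nat)))) = t.countP (fun d => decide (d < c)) :=
        countP_enum_ge t (s + 1) (s + (0 : Nat)) c (by simp)
      have hhead : ltP ((s, d).2, (s, d).1) (c, s + (0 : Nat)) = decide (d < c) := by
        simp [ltP]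
      by_cases hd : d < c
      · rw [List.countP_cons_of_pos (by rw [hhead]; simpa using hd), hterm,
          List.countP_cons_of_pos (by simpa using hd)]
        simp
      · rw [List.countP_cons_of_neg (by rw [hhead]; simpa using hd), hterm,
          List.countP_cons_of_neg (by simpa using hd)]
        simp
    | succ j =>
      have harg : s + ((j + 1 : Nat) : Int) = (s + 1) + (j : Int) := by push_cast; ring
      have htail := ih (s + 1) j
      have hhead : ltP ((s, d).2, (s, d).1) (c, s + ((j + 1 : Nat) : Int))
          = (decide (d < c) || !decide (c < d)) := by
        have hlt : decide (s < s + ((j + 1 : Nat) : Int)) = true := by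
          simp only [decide_eq_true_eq]; push_cast; omega
        simp [ltP]
      rw [List.take_succ_cons, List.count_cons]
      rcases lt_trichotomy d c with hd | hd | hd
      · rw [List.countP_cons_of_pos (by rw [hhead]; simp [hd]), harg, htail,
          List.countP_cons_of_pos (by simpa using hd)]
        have : (d == c) = false := by simpa using ne_of_lt hd
        simp [this]
        omega
      · subst hd
        rw [List.countP_cons_of_pos (by rw [hhead]; simp), harg, htail,
          List.countP_cons_of_neg (by simp)]
        simp
        omega
      · rw [List.countP_cons_of_neg
            (by rw [hhead]; simp [not_lt.mpr (le_of_lt hd), hd]), harg, htail,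
          List.countP_cons_of_neg (by simpa using not_lt_of_gt hd)]
        have : (d == c) = false := by simpa using (ne_of_gt hd)
        simp [this]

-- the two dict-update branches are one modify
lemma dict_append_branch (d : PySem.Dict Char (List Int)) (k : Char) (v : Int) :
    (if d.contains k then d.modify k [] (fun l => l ++ [v]) else d.insert k [v])
      = d.modify k [] (fun l => l ++ [v]) := by
  by_cases h : d.contains k
  · simp [h]
  · simp only [h, if_neg, Bool.false_eq_true, not_false_iff]
    rw [PySem.Dict.modify, PySem.Dict.getD_of_not_contains d [] (by simpa using h)]
    rfl

lemma dict_count_branch (d : PySem.Dict Char Int) (k : Char) :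
    (if d.contains k then d.modify k 0 (fun n => n + 1) else d.insert k 1)
      = d.modify k 0 (fun n => n + 1) := by
  by_cases h : d.contains k
  · simp [h]
  · simp only [h, if_neg, Bool.false_eq_true, not_false_iff]
    rw [PySem.Dict.modify, PySem.Dict.getD_of_not_contains d 0 (by simpa using h)]
    rfl

-- A's first loop: the dict maps c to the 1-based ranks of the c-pairs in the sorted list
lemma loop1_getD (S : List (Char × Int)) (c : Char) :
    ((PySem.List.enumerate S 1).foldl
      (fun (d : PySem.Dict Char (List Int)) q =>
        if d.contains q.2.1 then d.modify q.2.1 [] (fun l => l ++ [q.1]) else d.insert q.2.1 [q.1])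
      PySem.Dict.empty).getD c []
    = ((PySem.List.enumerate S 1).filter (fun q => q.2.1 == c)).map (fun q => q.1) := by
  have hfun : (fun (d : PySem.Dict Char (List Int)) (q : Int × (Char × Int)) =>
      if d.contains q.2.1 then d.modify q.2.1 [] (fun l => l ++ [q.1]) else d.insert q.2.1 [q.1])
      = (fun d q => d.modify q.2.1 [] (fun l => l ++ [q.1])) :=
    funext fun d => funext fun q => dict_append_branch d q.2.1 q.1
  rw [hfun]
  rw [show (PySem.List.enumerate S 1).foldl
      (fun (d : PySem.Dict Char (List Int)) q => d.modify q.2.1 [] (fun l => l ++ [q.1]))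
      PySem.Dict.empty
    = ((PySem.List.enumerate S 1).map (fun q => (q.2.1, q.1))).foldl
      (fun d p => d.modify p.1 [] (fun l => l ++ [p.2])) PySem.Dict.empty
    from (List.foldl_map (f := fun q : Int × Char × Int => (q.2.1, q.1))
      (g := fun (d : PySem.Dict Char (List Int)) (p : Char × Int) =>
        d.modify p.1 [] (fun l => l ++ [p.2]))).symm]
  rw [PySem.Dict.getD_foldl_modify_append]
  simp [List.filter_map, List.map_map, Function.comp_def]

-- A's second loop, with the processed prefix made explicit
def valsA (r : Char → List Int) : List Char → List Char → List Int
  | _, [] => []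
  | pref, c :: t =>
      PySem.List.pyGetD (r c) ((pref.count c : Int) + 1 - 1) 0 :: valsA r (pref ++ [c]) t

lemma loop2_eq_valsA (r : Char → List Int) (v pref : List Char) (acc : List Int)
    (d : PySem.Dict Char Int) (hd : ∀ c, d.getD c 0 = (pref.count c : Int)) :
    (v.foldl
      (fun (st : List Int × PySem.Dict Char Int) letter =>
        let lc := if st.2.contains letter then st.2.modify letter 0 (fun n => n + 1)
                  else st.2.insert letter 1
        (st.1 ++ [PySem.List.pyGetD (r letter) (lc.getD letter 0 - 1) 0], lc))
      (acc, d)).1 = acc ++ valsA r pref v := by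
  rw [show (fun (st : List Int × PySem.Dict Char Int) letter =>
        let lc := if st.2.contains letter then st.2.modify letter 0 (fun n => n + 1)
                  else st.2.insert letter 1
        (st.1 ++ [PySem.List.pyGetD (r letter) (lc.getD letter 0 - 1) 0], lc))
      = (fun (st : List Int × PySem.Dict Char Int) letter =>
        let lc := st.2.modify letter 0 (fun n => n + 1)
        (st.1 ++ [PySem.List.pyGetD (r letter) (lc.getD letter 0 - 1) 0], lc))
      from funext fun st => funext fun letter => by simp only [dict_count_branch]]
  induction v generalizing pref acc d with
  | nil => simp [valsA]
  | cons c t ih =>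
    rw [List.foldl_cons]
    change (List.foldl _
      (acc ++ [PySem.List.pyGetD (r c) ((d.modify c 0 (fun n => n + 1)).getD c 0 - 1) 0],
        d.modify c 0 (fun n => n + 1)) t).1 = _
    have hval : (d.modify c 0 (fun n => n + 1)).getD c 0 - 1 = (pref.count c : Int) + 1 - 1 := by
      rw [PySem.Dict.getD_modify_self, hd c]
    rw [hval]
    have hinv : ∀ c', (d.modify c 0 (fun n => n + 1)).getD c' 0
        = (((pref ++ [c]).count c') : Int) := by
      intro c'
      rw [PySem.Dict.getD_modify, List.count_append]
      by_cases h : c' = c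
      · subst h; rw [if_pos rfl, hd c']; simp
      · rw [if_neg h, hd c']
        have : [c].count c' = 0 := by simp [Ne.symm h]
        simp [this]
    rw [ih (pref ++ [c]) _ _ hinv, valsA]
    simp

-- the per-position values of A's loop agree with B's counting formula
lemma valsA_eq_map (u v pref : List Char) (hu : u = pref ++ v) :
    valsA (fun c => (((PySem.List.enumerate (SL u) 1).foldl
        (fun (d : PySem.Dict Char (List Int)) q =>
          if d.contains q.2.1 then d.modify q.2.1 [] (fun l => l ++ [q.1])
          else d.insert q.2.1 [q.1]) PySem.Dict.empty).getD c [])) pref v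
    = (PySem.List.enumerate v (pref.length : Int)).map (fun q =>
        1 + u.foldl (fun acc d => if d < q.2 then acc + 1 else acc) (0 : Int)
          + (PySem.List.count (PySem.List.slice u none (some q.1)) q.2 : Int)) := by
  induction v generalizing pref with
  | nil => simp [valsA, PySem.List.enumerate_nil]
  | cons c t ih =>
    rw [PySem.List.enumerate_cons, List.map_cons, valsA]
    congr 1
    · have hj : u[pref.length]? = some c := by
        rw [hu, List.getElem?_append_right (le_refl _)]
        simp
      have hm : ((c, (pref.length : Int)) : Char × Int) ∈ SL u :=
        ((SL_perm u).mem_iff).mpr (psL_mem u pref.length c hj)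
      have hocc : ((psL u).filter (fun q => q.1 == c)).idxOf (c, (pref.length : Int))
          = pref.count c := by
        have h0 := psL_occ u 0 pref.length c hj
        rw [hu] at h0
        simpa [psL, hu, List.take_left] using h0
      have hidx : ((pref.count c : Int) + 1 - 1)
          = ((((SL u).filter (fun q => q.1 == c)).idxOf (c, (pref.length : Int)) : Nat) : Int) := by
        rw [filter_SL_eq, hocc]; ring
      have hA : PySem.List.pyGetD
          ((((PySem.List.enumerate (SL u) 1).foldl
            (fun (d : PySem.Dict Char (List Int)) q =>
              if d.contains q.2.1 then d.modify q.2.1 [] (fun l => l ++ [q.1])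
              else d.insert q.2.1 [q.1]) PySem.Dict.empty).getD c []))
          ((pref.count c : Int) + 1 - 1) 0
          = 1 + (SL u).idxOf (c, (pref.length : Int)) := by
        rw [loop1_getD (SL u) c, hidx, PySem.List.pyGetD_natCast,
          key_rank (SL u) 1 c (c, (pref.length : Int)) hm rfl]
      rw [hA]
      -- convert the rank to B's counting formula
      have hcnt : (SL u).idxOf (c, (pref.length : Int))
          = u.countP (fun d => decide (d < c)) + (u.take pref.length).count c := by
        rw [idxOf_eq_countP (SL u) (SL_pairwise u) (SL_nodup u) _ hm,
          (SL_perm u).countP_eq]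
        have h := countP_psL_main u 0 pref.length c
        simpa [psL] using h
      rw [hcnt]
      have hfold : u.foldl (fun acc d => if d < c then acc + 1 else acc) (0 : Int)
          = (u.countP (fun d => decide (d < c)) : Int) := by
        rw [PySem.List.foldl_ite_add_one]
        simp
      have hslice : PySem.List.slice u none (some ((pref.length : Nat) : Int)) = u.take pref.length :=
        PySem.List.slice_to_natCast u pref.length
      rw [hfold, hslice, PySem.List.count_eq]
      push_cast
      ring
    · have hu' : u = (pref ++ [c]) ++ t := by rw [hu]; simp
      have h := ih (pref ++ [c]) hu'
      have hlen : (((pref ++ [c]).length : Nat) : Int) = (pref.length : Int) + 1 := by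
        simp
      rw [hlen] at h
      exact h

lemma main_eq (u : List Char) :
    (let sorted_letters := PySem.List.sorted2
        ((PySem.List.enumerate u 0).map (fun q => (q.2, q.1))) (fun p => p.1) (fun p => p.2) false
     let order := (PySem.List.enumerate sorted_letters 1).foldl
        (fun (d : PySem.Dict Char (List Int)) q =>
          if d.contains q.2.1 then d.modify q.2.1 [] (fun l => l ++ [q.1]) else d.insert q.2.1 [q.1])
        PySem.Dict.empty
     let res := u.foldl
        (fun (st : List Int × PySem.Dict Char Int) letter =>
          let lc := if st.2.contains letter then st.2.modify letter 0 (fun n => n + 1)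
                    else st.2.insert letter 1
          (st.1 ++ [PySem.List.pyGetD (order.getD letter []) (lc.getD letter 0 - 1) 0], lc))
        ([], PySem.Dict.empty)
     res.1)
    = (PySem.List.enumerate u 0).map (fun q =>
        1 + u.foldl (fun acc d => if d < q.2 then acc + 1 else acc) (0 : Int)
          + (PySem.List.count (PySem.List.slice u none (some q.1)) q.2 : Int)) := by
  have hinv : ∀ c, (PySem.Dict.empty : PySem.Dict Char Int).getD c 0
      = ((([] : List Char).count c : Nat) : Int) := by
    intro c; simp [PySem.Dict.getD_empty]
  have h1 := loop2_eq_valsA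
    (fun c => (((PySem.List.enumerate (SL u) 1).foldl
      (fun (d : PySem.Dict Char (List Int)) q =>
        if d.contains q.2.1 then d.modify q.2.1 [] (fun l => l ++ [q.1])
        else d.insert q.2.1 [q.1]) PySem.Dict.empty).getD c []))
    u [] [] PySem.Dict.empty hinv
  have h2 := valsA_eq_map u u [] rfl
  simp only [List.length_nil, Nat.cast_zero] at h2
  rw [h2] at h1
  simpa [SL, psL] using h1

-- ===== VERDICT (by name: the statement is the Claim_ definition above) =====
theorem create_key_order_spec : Claim_equal_create_key_order := by
  intro key _
  unfold Spec_create_key_order create_key_order create_key_order_alt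
  have h := main_eq ((PySem.Str.upper key).toList)
  simpa [SL, psL] using h
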